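-- pv_equiv track=rewrite | github.com/WilSonS9/AoC2021 | aoc6part1.py | newGen
-- ===== SOURCE A (Python) =====
-- def newGen(l):
--     l = list(map(lambda x: x-1, l))
--     still = list(filter(lambda x: x >= 0, l))
--     new = list(filter(lambda x: x < 0, l))
--     for e in new:
--         still.append(6)
--         still.append(8)
--     return still
-- ===== SOURCE B (Python) =====
-- def newGen(l):
--     # Stable-sort by the boolean key x < 1: survivors keep their relative order
--     # and every dying fish moves behind them; one comprehension then emits
--     # x-1 per survivor and the newborn pair 6,8 per dying fish.
--     return [v
--             for x in sorted(l, key=lambda x: x < 1)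
--             for v in ((x - 1,) if x >= 1 else (6, 8))]
-- ===== Notes on version B (the rewrite author's own statement) =====
-- stated objective: alternative
-- what changed: B replaces A's decrement-map, two filter passes and append loop by a stable sort on the boolean key x < 1 -- which moves all dying fish behind the survivors while keeping order -- followed by one flatMap pass emitting x-1 per survivor and the newborn pair 6,8 per dying fish.
import Mathlib
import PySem

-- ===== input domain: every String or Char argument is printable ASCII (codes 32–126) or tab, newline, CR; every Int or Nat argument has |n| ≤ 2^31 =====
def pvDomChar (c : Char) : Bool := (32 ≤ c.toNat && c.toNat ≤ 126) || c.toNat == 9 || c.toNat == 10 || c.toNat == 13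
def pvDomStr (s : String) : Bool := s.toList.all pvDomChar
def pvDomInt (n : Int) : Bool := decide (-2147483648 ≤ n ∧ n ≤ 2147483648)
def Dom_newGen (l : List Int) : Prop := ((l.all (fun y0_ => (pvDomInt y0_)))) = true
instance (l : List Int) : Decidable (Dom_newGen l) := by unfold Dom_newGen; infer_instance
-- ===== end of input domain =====

-- B replaces A's decrement-map + two filters + append loop by a stable sort on the
-- boolean key (x < 1) (dying fish move behind the survivors, order preserved) followed
-- by one flatMap pass; alternative decomposition, no speed claim.
-- ===== PORT A =====
def newGen (l : List Int) : List Int :=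
  let l' := l.map (fun x => x - 1)
  let still := l'.filter (fun x => x ≥ 0)
  let new := l'.filter (fun x => x < 0)
  new.foldl (fun still _e => (still ++ [6]) ++ [8]) still

-- ===== PORT B =====
def newGen_alt (l : List Int) : List Int :=
  (PySem.List.sorted l (fun x => decide (x < 1))).flatMap
    (fun x => if x ≥ 1 then [x - 1] else [6, 8])

-- ===== PRECONDITION & SPEC =====
def Spec_newGen (l : List Int) (out : List Int) : Prop := out = newGen_alt l
instance (l : List Int) (out : List Int) : Decidable (Spec_newGen l out) := by unfold Spec_newGen; infer_instance

-- ===== CLAIM (what is proved, stated in full; the proofs are below) =====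
def Claim_equal_newGen : Prop := ∀ (l : List Int), Dom_newGen l → Spec_newGen l (newGen l)

-- ===== LEMMAS AND PROOFS =====

-- inserting a false-key element lands just before the true-key block
lemma ins_false (k : Int → Bool) (x : Int) (hx : k x = false) :
    ∀ (as bs : List Int), (∀ a ∈ as, k a = false) → (∀ b ∈ bs, k b = true) →
      PySem.List.insertBy (fun a b => decide (k a < k b)) x (as ++ bs) = as ++ x :: bs := by
  intro as
  induction as with
  | nil =>
    intro bs _ hbs
    cases bs with
    | nil => simp [PySem.List.insertBy]
    | cons b t =>
      have hb : k b = true := hbs b (by simp)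
      simp [PySem.List.insertBy, hx, hb]
  | cons a t ih =>
    intro bs has hbs
    have ha : k a = false := has a (by simp)
    have hrec := ih bs (fun a ha' => has a (List.mem_cons_of_mem _ ha')) hbs
    simp [PySem.List.insertBy, hx, ha, hrec]

-- inserting a true-key element lands at the very end
lemma ins_true (k : Int → Bool) (x : Int) (hx : k x = true) (ys : List Int) :
    PySem.List.insertBy (fun a b => decide (k a < k b)) x ys = ys ++ [x] := by
  apply PySem.List.insertBy_of_forall_not_before
  intro y _
  rw [hx]
  cases k y <;> decide

-- the insertion-sort fold realises a stable partition by the boolean key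
lemma fold_partition (k : Int → Bool) :
    ∀ (l as bs : List Int), (∀ a ∈ as, k a = false) → (∀ b ∈ bs, k b = true) →
      l.foldl (fun acc x => PySem.List.insertBy (fun a b => decide (k a < k b)) x acc) (as ++ bs)
        = (as ++ l.filter (fun x => !(k x))) ++ (bs ++ l.filter k) := by
  intro l
  induction l with
  | nil => intro as bs _ _; simp
  | cons x t ih =>
    intro as bs has hbs
    simp only [List.foldl_cons]
    cases hx : k x with
    | false =>
      have has' : ∀ a ∈ as ++ [x], k a = false := by
        intro a ha
        rcases List.mem_append.mp ha with h | h
        · exact has a h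
        · simp at h; subst h; exact hx
      rw [ins_false k x hx as bs has hbs,
          show as ++ x :: bs = (as ++ [x]) ++ bs by simp,
          ih (as ++ [x]) bs has' hbs]
      simp [hx]
    | true =>
      have hbs' : ∀ b ∈ bs ++ [x], k b = true := by
        intro b hb
        rcases List.mem_append.mp hb with h | h
        · exact hbs b h
        · simp at h; subst h; exact hx
      rw [ins_true k x hx (as ++ bs), List.append_assoc, ih as (bs ++ [x]) has hbs']
      simp [hx]

-- sorted by a boolean key = false-key elements, then true-key elements (order kept)
lemma sorted_bool_partition (k : Int → Bool) (l : List Int) :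
    PySem.List.sorted l (fun x => k x) = l.filter (fun x => !(k x)) ++ l.filter k := by
  rw [PySem.List.sorted_eq_foldl_insertBy]
  have := fold_partition k l [] [] (by simp) (by simp)
  simpa using this

-- survivors segment of B's flatMap
lemma fm_surv : ∀ (l : List Int), (∀ x ∈ l, ¬ x < 1) →
    l.flatMap (fun x => if x ≥ 1 then [x - 1] else [6, 8]) = l.map (fun x => x - 1) := by
  intro l
  induction l with
  | nil => intro _; simp
  | cons x t ih =>
    intro h
    have hx : ¬ x < 1 := h x (by simp)
    simp only [List.flatMap_cons, List.map_cons, if_pos (by omega : x ≥ 1),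
      ih (fun y hy => h y (by simp [hy]))]
    simp

-- dying segment of B's flatMap
lemma fm_die : ∀ (l : List Int), (∀ x ∈ l, x < 1) →
    l.flatMap (fun x => if x ≥ 1 then [x - 1] else [6, 8])
      = (List.replicate l.length ([6, 8] : List Int)).flatten := by
  intro l
  induction l with
  | nil => intro _; simp
  | cons x t ih =>
    intro h
    have hx : x < 1 := h x (by simp)
    simp only [List.flatMap_cons, List.length_cons, List.replicate_succ, List.flatten_cons,
      if_neg (by omega : ¬ x ≥ 1), ih (fun y hy => h y (by simp [hy]))]

-- A's append loop = appending [6,8] once per element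
lemma foldA (new acc : List Int) :
    new.foldl (fun still _e => (still ++ [6]) ++ [8]) acc
      = acc ++ (List.replicate new.length ([6, 8] : List Int)).flatten := by
  induction new generalizing acc with
  | nil => simp
  | cons h t ih =>
    simp only [List.foldl_cons, List.length_cons, List.replicate_succ, List.flatten_cons]
    rw [ih]
    simp

-- ===== VERDICT (by name: the statement is the Claim_ definition above) =====
theorem newGen_spec : Claim_equal_newGen := by
  intro l _
  show newGen l = newGen_alt l
  simp only [newGen, newGen_alt]
  rw [sorted_bool_partition (fun x => decide (x < 1)) l, List.flatMap_append, foldA]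
  have h1 : ∀ x ∈ List.filter (fun x => !decide (x < 1)) l, ¬ x < 1 := by
    intro x hx
    have := List.of_mem_filter hx
    simpa using this
  have h2 : ∀ x ∈ List.filter (fun x => decide (x < 1)) l, x < 1 := by
    intro x hx
    have := List.of_mem_filter hx
    simpa using this
  rw [fm_surv _ h1, fm_die _ h2]
  congr 1
  · rw [List.filter_map]
    congr 1
    apply List.filter_congr
    intro x _
    simp only [Function.comp_apply]
    by_cases h : x < 1 <;> simp [h] <;> omega
  · congr 1
    rw [List.filter_map, List.length_map]
    have hp : List.filter ((fun x => decide (x < 0)) ∘ fun x => x - 1) l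
        = List.filter (fun x => decide (x < 1)) l := by
      apply List.filter_congr
      intro x _
      simp only [Function.comp_apply]
      by_cases h : x < 1 <;> simp [h] <;> omega
    rw [hp]
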